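-- pv_equiv track=rewrite | github.com/josealt2197/PP1 | Proyecto Josué y Jose/ProgramaPrincipal.py | cifrarLetraCodigoTelefonico
-- ===== SOURCE A (Python) =====
-- def buscarCaracter(cadena, caracter):
--     indice = 0
--
--     while (indice != len(cadena)):
--         if (cadena[indice] == caracter):
--             return indice
--         indice += 1
--
--     return -1
--
-- def cifrarLetraCodigoTelefonico(letra):
--     letraCifrada = ""
--     numeroAsignado = 1
--     bloque = ""
--     inicio = 0
--     fin = 3
--     letras = "abcdefghijklmnopqrstuvwxyz"
--
--     if (buscarCaracter(letras, letra) != -1):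
--         while (inicio < 25):
--
--             bloque = letras[inicio:fin]
--
--             if (buscarCaracter(bloque, letra) == -1):
--                 if (numeroAsignado == 5 or numeroAsignado == 7):
--                     inicio += 3
--                     fin += 4
--                 elif (numeroAsignado == 6):
--                     inicio += 4
--                     fin += 3
--                 else:
--                     inicio += 3
--                     fin += 3
--
--                 numeroAsignado += 1
--             else:
--                 return str(numeroAsignado + 1) + str(buscarCaracter(bloque, letra) + 1)
--
--     elif (letra == " "):
--         return "*"
--     else:
--         return letra
-- ===== SOURCE B (Python) =====
-- def cifrarLetraCodigoTelefonico(letra):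
--     # Closed-form keypad code: no scanning loops.
--     if isinstance(letra, str) and len(letra) == 1 and 'a' <= letra <= 'z':
--         i = ord(letra) - 97
--         if i < 15:
--             digit, pos = i // 3 + 2, i % 3 + 1
--         elif i < 19:
--             digit, pos = 7, i - 14
--         elif i < 22:
--             digit, pos = 8, i - 18
--         else:
--             digit, pos = 9, i - 21
--         return str(digit) + str(pos)
--     elif letra == " ":
--         return "*"
--     else:
--         return letra
-- ===== Notes on version B (the rewrite author's own statement) =====
-- stated objective: simpler
-- what changed: Replaces the alphabet scan plus block-advancing while loop (with its 5/6/7 special stepping) by a closed-form arithmetic index computation from ord(letra).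
import Mathlib
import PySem

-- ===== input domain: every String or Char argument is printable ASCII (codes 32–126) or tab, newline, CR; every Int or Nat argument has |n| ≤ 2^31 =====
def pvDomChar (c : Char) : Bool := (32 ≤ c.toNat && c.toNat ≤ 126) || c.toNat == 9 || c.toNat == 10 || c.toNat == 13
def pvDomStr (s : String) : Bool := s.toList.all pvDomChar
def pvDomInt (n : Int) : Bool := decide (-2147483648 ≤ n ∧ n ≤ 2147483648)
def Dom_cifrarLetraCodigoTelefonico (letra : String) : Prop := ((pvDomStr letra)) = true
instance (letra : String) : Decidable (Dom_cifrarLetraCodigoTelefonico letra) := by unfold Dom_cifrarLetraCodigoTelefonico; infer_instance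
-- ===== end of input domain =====

-- B replaces A's alphabet scan and block-advancing while loop by a closed-form
-- arithmetic computation from the letter's character code (objective: simpler).


-- ===== PORT A =====
-- strings are handled through their character lists; a 1-char string equality
-- (cadena[indice] == caracter) is the list equality [x] = car
def buscarCaracterAux : List Char → List Char → Int → Int
  | [], _, _ => -1
  | x :: rest, car, indice => if [x] = car then indice else buscarCaracterAux rest car (indice + 1)

def buscarCaracter (cadena car : List Char) : Int := buscarCaracterAux cadena car 0

def pvLetras : List Char := ['a', 'b', 'c', 'd', 'e', 'f', 'g', 'h', 'i', 'j', 'k', 'l', 'm', 'n', 'o', 'p', 'q', 'r', 's', 't', 'u', 'v', 'w', 'x', 'y', 'z']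

-- the while loop; fuel bounds the iterations (numeroAsignado 1..8, so 9 is enough);
-- `none` = the Python function falls through without a `return` (returns None)
def cifrarLoopA : Nat → Int → Int → Int → List Char → Option String
  | 0, _, _, _, _ => none
  | fuel + 1, numeroAsignado, inicio, fin, l =>
    if inicio < 25 then
      let bloque := PySem.List.slice pvLetras (some inicio) (some fin)
      if buscarCaracter bloque l = -1 then
        if numeroAsignado = 5 ∨ numeroAsignado = 7 then
          cifrarLoopA fuel (numeroAsignado + 1) (inicio + 3) (fin + 4) l
        else if numeroAsignado = 6 then
          cifrarLoopA fuel (numeroAsignado + 1) (inicio + 4) (fin + 3) l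
        else
          cifrarLoopA fuel (numeroAsignado + 1) (inicio + 3) (fin + 3) l
      else
        some (PySem.Int.toStr (numeroAsignado + 1) ++ PySem.Int.toStr (buscarCaracter bloque l + 1))
    else none

-- `none` = "return letra" (the final else branch / falling through)
def cifrarA (l : List Char) : Option String :=
  if buscarCaracter pvLetras l ≠ -1 then cifrarLoopA 9 1 0 3 l
  else if l = [' '] then some "*"
  else none

def cifrarLetraCodigoTelefonico (letra : String) : String :=
  (cifrarA letra.toList).getD letra

-- ===== PORT B =====
-- closed-form arithmetic; `none` = "return letra"
def cifrarB (l : List Char) : Option String :=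
  match l with
  | [c] =>
    if 97 ≤ c.toNat ∧ c.toNat ≤ 122 then
      let i : Int := (c.toNat : Int) - 97
      let dp : Int × Int :=
        if i < 15 then (PySem.Int.floordiv i 3 + 2, PySem.Int.mod i 3 + 1)
        else if i < 19 then (7, i - 14)
        else if i < 22 then (8, i - 18)
        else (9, i - 21)
      some (PySem.Int.toStr dp.1 ++ PySem.Int.toStr dp.2)
    else if c = ' ' then some "*"
    else none
  | _ => if l = [' '] then some "*" else none

def cifrarLetraCodigoTelefonico_alt (letra : String) : String :=
  (cifrarB letra.toList).getD letra

-- ===== PRECONDITION & SPEC =====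
def Spec_cifrarLetraCodigoTelefonico (letra : String) (out : String) : Prop := out = cifrarLetraCodigoTelefonico_alt letra
instance (letra : String) (out : String) : Decidable (Spec_cifrarLetraCodigoTelefonico letra out) := by unfold Spec_cifrarLetraCodigoTelefonico; infer_instance

-- ===== CLAIM (what is proved, stated in full; the proofs are below) =====
def Claim_equal_cifrarLetraCodigoTelefonico : Prop := ∀ (letra : String), Dom_cifrarLetraCodigoTelefonico letra → Spec_cifrarLetraCodigoTelefonico letra (cifrarLetraCodigoTelefonico letra)

-- ===== LEMMAS AND PROOFS =====

theorem buscarCaracterAux_neg (cad : List Char) (l : List Char) (i : Int)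
    (h : ∀ x ∈ cad, [x] ≠ l) : buscarCaracterAux cad l i = -1 := by
  induction cad generalizing i with
  | nil => rfl
  | cons x rest ih =>
    simp only [buscarCaracterAux]
    rw [if_neg (h x (by simp))]
    exact ih _ (fun y hy => h y (List.mem_cons_of_mem _ hy))

-- a non-singleton list is found nowhere, so both ports fall to the same branch
theorem core_non_singleton (l : List Char) (h : ∀ c : Char, l ≠ [c]) :
    cifrarA l = cifrarB l := by
  have hb : buscarCaracter pvLetras l = -1 :=
    buscarCaracterAux_neg _ _ _ (fun x _ hx => h x hx.symm)
  cases l with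
  | nil => simp [cifrarA, cifrarB, hb]
  | cons c rest =>
    cases rest with
    | nil => exact absurd rfl (h c)
    | cons d rest' => simp [cifrarA, cifrarB, hb]

theorem core_singleton (c : Char) : cifrarA [c] = cifrarB [c] := by
  by_cases h : 97 ≤ c.toNat ∧ c.toNat ≤ 122
  · obtain ⟨h1, h2⟩ := h
    have hc : c = Char.ofNat c.toNat := (Char.ofNat_toNat c).symm
    set n := c.toNat with hn
    interval_cases n <;> (rw [hc]; decide)
  · -- not a lowercase letter: A's initial scan fails, B's guard fails
    have hall : ∀ x ∈ pvLetras, 97 ≤ x.toNat ∧ x.toNat ≤ 122 := by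
      intro x hx
      fin_cases hx <;> exact ⟨by decide, by decide⟩
    have hne : ∀ x ∈ pvLetras, [x] ≠ [c] := by
      intro x hx e
      have hxc : x = c := by injection e
      exact h (hxc ▸ hall x hx)
    have hb : buscarCaracter pvLetras [c] = -1 := buscarCaracterAux_neg _ _ _ hne
    by_cases hs : c = ' '
    · subst hs; decide
    · simp [cifrarA, cifrarB, hb, h, hs]

theorem core (l : List Char) : cifrarA l = cifrarB l := by
  by_cases h : ∃ c : Char, l = [c]
  · obtain ⟨c, rfl⟩ := h
    exact core_singleton c
  · exact core_non_singleton l (fun c hc => h ⟨c, hc⟩)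

-- ===== VERDICT (by name: the statement is the Claim_ definition above) =====
theorem cifrarLetraCodigoTelefonico_spec : Claim_equal_cifrarLetraCodigoTelefonico := by
  intro letra _
  unfold Spec_cifrarLetraCodigoTelefonico cifrarLetraCodigoTelefonico cifrarLetraCodigoTelefonico_alt
  rw [core]
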